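-- pv_equiv track=rewrite | github.com/OmChanna/BA-Workflow-Assitant | backend.py | get_downstream
-- ===== SOURCE A (Python) =====
-- DEPENDENCY_MAP = {
--     "brief": ["stakeholder", "requirement"],
--     "stakeholder": ["requirement"],
--     "requirement": ["risk_score", "test_script", "fsd_section", "process_flow", "nfr", "change_impact", "user_story"],
--     "nfr": ["test_script", "change_impact", "user_story"], "risk_score": ["change_impact", "user_story"], "process_flow": ["fsd_section"],
--     "fsd_section": ["test_script", "change_impact", "user_story"], "test_script": ["defect"],
--     "assumption": ["requirement"], "constraint": ["requirement"],
--     "change_impact": [], "user_story": ["test_script"],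
-- }
--
-- ARTEFACT_OWNER = {
--     "stakeholder": "A01", "requirement": "A04", "nfr": "A05",
--     "process_flow": "A09", "risk_score": "A08", "fsd_section": "A09",
--     "test_script": "A11", "defect": "A12", "constraint": "A07", "handover_doc": "A13",
--     "change_impact": "A10", "user_story": "A14",
-- }
--
-- def get_downstream(artefact_type):
--     affected, visited, queue = [], set(), list(DEPENDENCY_MAP.get(artefact_type, []))
--     while queue:
--         dt = queue.pop(0)
--         if dt in visited: continue
--         visited.add(dt)
--         affected.append({"artefact_type": dt, "owning_agent": ARTEFACT_OWNER.get(dt, "?")})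
--         queue.extend(DEPENDENCY_MAP.get(dt, []))
--     return affected
-- ===== SOURCE B (Python) =====
-- # Precomputed downstream closure of the fixed DEPENDENCY_MAP (BFS first-visit order),
-- # with each artefact type paired with its owning agent from ARTEFACT_OWNER.
-- DOWNSTREAM = {
--     "brief": [("stakeholder", "A01"), ("requirement", "A04"), ("risk_score", "A08"),
--               ("test_script", "A11"), ("fsd_section", "A09"), ("process_flow", "A09"),
--               ("nfr", "A05"), ("change_impact", "A10"), ("user_story", "A14"), ("defect", "A12")],
--     "stakeholder": [("requirement", "A04"), ("risk_score", "A08"), ("test_script", "A11"),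
--                     ("fsd_section", "A09"), ("process_flow", "A09"), ("nfr", "A05"),
--                     ("change_impact", "A10"), ("user_story", "A14"), ("defect", "A12")],
--     "requirement": [("risk_score", "A08"), ("test_script", "A11"), ("fsd_section", "A09"),
--                     ("process_flow", "A09"), ("nfr", "A05"), ("change_impact", "A10"),
--                     ("user_story", "A14"), ("defect", "A12")],
--     "nfr": [("test_script", "A11"), ("change_impact", "A10"), ("user_story", "A14"), ("defect", "A12")],
--     "risk_score": [("change_impact", "A10"), ("user_story", "A14"), ("test_script", "A11"), ("defect", "A12")],
--     "process_flow": [("fsd_section", "A09"), ("test_script", "A11"), ("change_impact", "A10"),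
--                      ("user_story", "A14"), ("defect", "A12")],
--     "fsd_section": [("test_script", "A11"), ("change_impact", "A10"), ("user_story", "A14"), ("defect", "A12")],
--     "test_script": [("defect", "A12")],
--     "assumption": [("requirement", "A04"), ("risk_score", "A08"), ("test_script", "A11"),
--                    ("fsd_section", "A09"), ("process_flow", "A09"), ("nfr", "A05"),
--                    ("change_impact", "A10"), ("user_story", "A14"), ("defect", "A12")],
--     "constraint": [("requirement", "A04"), ("risk_score", "A08"), ("test_script", "A11"),
--                    ("fsd_section", "A09"), ("process_flow", "A09"), ("nfr", "A05"),
--                    ("change_impact", "A10"), ("user_story", "A14"), ("defect", "A12")],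
--     "change_impact": [],
--     "user_story": [("test_script", "A11"), ("defect", "A12")],
-- }
--
-- def get_downstream(artefact_type):
--     return [{"artefact_type": dt, "owning_agent": owner}
--             for dt, owner in DOWNSTREAM.get(artefact_type, [])]
-- ===== Notes on version B (the rewrite author's own statement) =====
-- stated objective: simpler
-- what changed: Replaces the runtime BFS (queue, visited set, pop(0)) over the fixed constant DEPENDENCY_MAP by a precomputed transitive-closure lookup table: each call is one dict lookup plus a comprehension attaching owners, no traversal at all.
import Mathlib
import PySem

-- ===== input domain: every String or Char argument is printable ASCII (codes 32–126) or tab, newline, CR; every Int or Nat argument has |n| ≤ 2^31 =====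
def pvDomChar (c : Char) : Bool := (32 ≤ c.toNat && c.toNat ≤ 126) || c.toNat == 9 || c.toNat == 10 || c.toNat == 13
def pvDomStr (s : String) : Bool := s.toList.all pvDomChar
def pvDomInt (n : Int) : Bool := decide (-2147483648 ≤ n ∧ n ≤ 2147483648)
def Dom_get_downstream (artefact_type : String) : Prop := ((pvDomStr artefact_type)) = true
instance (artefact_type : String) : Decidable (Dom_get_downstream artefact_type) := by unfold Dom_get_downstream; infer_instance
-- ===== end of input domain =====

-- B replaces A's per-call BFS over the fixed constant DEPENDENCY_MAP by a precomputed
-- transitive-closure lookup table plus one owner-attaching map; same return value.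

-- shared module constants (DEPENDENCY_MAP / ARTEFACT_OWNER in the Python module)
def pvDepMap : PySem.Dict String (List String) := PySem.Dict.ofList
  [("brief", ["stakeholder", "requirement"]),
   ("stakeholder", ["requirement"]),
   ("requirement", ["risk_score", "test_script", "fsd_section", "process_flow", "nfr", "change_impact", "user_story"]),
   ("nfr", ["test_script", "change_impact", "user_story"]),
   ("risk_score", ["change_impact", "user_story"]),
   ("process_flow", ["fsd_section"]),
   ("fsd_section", ["test_script", "change_impact", "user_story"]),
   ("test_script", ["defect"]),
   ("assumption", ["requirement"]),
   ("constraint", ["requirement"]),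
   ("change_impact", []),
   ("user_story", ["test_script"])]

def pvOwnMap : PySem.Dict String String := PySem.Dict.ofList
  [("stakeholder", "A01"), ("requirement", "A04"), ("nfr", "A05"),
   ("process_flow", "A09"), ("risk_score", "A08"), ("fsd_section", "A09"),
   ("test_script", "A11"), ("defect", "A12"), ("constraint", "A07"), ("handover_doc", "A13"),
   ("change_impact", "A10"), ("user_story", "A14")]

-- ===== PORT A =====
-- while queue: dt = queue.pop(0); skip if visited; append entry; queue.extend(deps).
-- 'fuel' only makes the loop total; 1000 exceeds the loop's true bound (≤ 103 iterations
-- since at most 12 nodes are ever marked visited and each enqueues ≤ 7 successors).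
def pvLoopA (fuel : Nat) (affected : List (List (String × String))) (visited : PySem.Set String)
    (queue : List String) : List (List (String × String)) :=
  match fuel, queue with
  | _, [] => affected
  | 0, _ => affected
  | fuel + 1, dt :: rest =>
    if visited.contains dt then
      pvLoopA fuel affected visited rest
    else
      pvLoopA fuel (affected ++ [[("artefact_type", dt), ("owning_agent", PySem.Dict.getD pvOwnMap dt "?")]])
        (PySem.Set.add visited dt) (rest ++ PySem.Dict.getD pvDepMap dt [])

def get_downstream (artefact_type : String) : List (List (String × String)) :=
  pvLoopA 1000 [] PySem.Set.empty (PySem.Dict.getD pvDepMap artefact_type [])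

-- ===== PORT B =====
-- DOWNSTREAM in Source B: precomputed closure with owners baked in
def pvClosure : PySem.Dict String (List (String × String)) := PySem.Dict.ofList
  [("brief", [("stakeholder", "A01"), ("requirement", "A04"), ("risk_score", "A08"),
              ("test_script", "A11"), ("fsd_section", "A09"), ("process_flow", "A09"),
              ("nfr", "A05"), ("change_impact", "A10"), ("user_story", "A14"), ("defect", "A12")]),
   ("stakeholder", [("requirement", "A04"), ("risk_score", "A08"), ("test_script", "A11"),
                    ("fsd_section", "A09"), ("process_flow", "A09"), ("nfr", "A05"),
                    ("change_impact", "A10"), ("user_story", "A14"), ("defect", "A12")]),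
   ("requirement", [("risk_score", "A08"), ("test_script", "A11"), ("fsd_section", "A09"),
                    ("process_flow", "A09"), ("nfr", "A05"), ("change_impact", "A10"),
                    ("user_story", "A14"), ("defect", "A12")]),
   ("nfr", [("test_script", "A11"), ("change_impact", "A10"), ("user_story", "A14"), ("defect", "A12")]),
   ("risk_score", [("change_impact", "A10"), ("user_story", "A14"), ("test_script", "A11"), ("defect", "A12")]),
   ("process_flow", [("fsd_section", "A09"), ("test_script", "A11"), ("change_impact", "A10"),
                     ("user_story", "A14"), ("defect", "A12")]),
   ("fsd_section", [("test_script", "A11"), ("change_impact", "A10"), ("user_story", "A14"), ("defect", "A12")]),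
   ("test_script", [("defect", "A12")]),
   ("assumption", [("requirement", "A04"), ("risk_score", "A08"), ("test_script", "A11"),
                   ("fsd_section", "A09"), ("process_flow", "A09"), ("nfr", "A05"),
                   ("change_impact", "A10"), ("user_story", "A14"), ("defect", "A12")]),
   ("constraint", [("requirement", "A04"), ("risk_score", "A08"), ("test_script", "A11"),
                   ("fsd_section", "A09"), ("process_flow", "A09"), ("nfr", "A05"),
                   ("change_impact", "A10"), ("user_story", "A14"), ("defect", "A12")]),
   ("change_impact", []),
   ("user_story", [("test_script", "A11"), ("defect", "A12")])]

def get_downstream_alt (artefact_type : String) : List (List (String × String)) :=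
  (PySem.Dict.getD pvClosure artefact_type []).map
    (fun p => [("artefact_type", p.1), ("owning_agent", p.2)])

-- ===== PRECONDITION & SPEC =====
def Spec_get_downstream (artefact_type : String) (out : List (List (String × String))) : Prop := out = get_downstream_alt artefact_type
instance (artefact_type : String) (out : List (List (String × String))) : Decidable (Spec_get_downstream artefact_type out) := by unfold Spec_get_downstream; infer_instance

-- ===== CLAIM (what is proved, stated in full; the proofs are below) =====
def Claim_equal_get_downstream : Prop := ∀ (artefact_type : String), Dom_get_downstream artefact_type → Spec_get_downstream artefact_type (get_downstream artefact_type)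

-- ===== LEMMAS AND PROOFS =====

lemma pvGetD_not_key {α : Type} (m : PySem.Dict String α) (d : α) (s : String)
    (h : ∀ p ∈ m.items, p.1 ≠ s) : PySem.Dict.getD m s d = d := by
  simp only [PySem.Dict.getD, PySem.Dict.get?]
  rw [List.find?_eq_none.mpr]
  · rfl
  · intro p hp
    simpa using h p hp

lemma pvNotKey_eq (s : String)
    (h : s ∉ (["brief", "stakeholder", "requirement", "nfr", "risk_score", "process_flow",
      "fsd_section", "test_script", "assumption", "constraint", "change_impact", "user_story"] : List String)) :
    get_downstream s = get_downstream_alt s := by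
  simp only [List.mem_cons, List.not_mem_nil, or_false, not_or] at h
  obtain ⟨n1, n2, n3, n4, n5, n6, n7, n8, n9, n10, n11, n12⟩ := h
  have hd : PySem.Dict.getD pvDepMap s [] = [] := by
    apply pvGetD_not_key
    intro p hp
    have : pvDepMap.items = [("brief", ["stakeholder", "requirement"]),
      ("stakeholder", ["requirement"]),
      ("requirement", ["risk_score", "test_script", "fsd_section", "process_flow", "nfr", "change_impact", "user_story"]),
      ("nfr", ["test_script", "change_impact", "user_story"]),
      ("risk_score", ["change_impact", "user_story"]),
      ("process_flow", ["fsd_section"]),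
      ("fsd_section", ["test_script", "change_impact", "user_story"]),
      ("test_script", ["defect"]),
      ("assumption", ["requirement"]),
      ("constraint", ["requirement"]),
      ("change_impact", []),
      ("user_story", ["test_script"])] := by decide
    rw [this] at hp
    simp only [List.mem_cons, List.not_mem_nil, or_false] at hp
    rcases hp with h | h | h | h | h | h | h | h | h | h | h | h <;> subst h <;>
      (first | exact Ne.symm n1 | exact Ne.symm n2 | exact Ne.symm n3 | exact Ne.symm n4 | exact Ne.symm n5 | exact Ne.symm n6 | exact Ne.symm n7 | exact Ne.symm n8 | exact Ne.symm n9 | exact Ne.symm n10 | exact Ne.symm n11 | exact Ne.symm n12)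
  have hc : PySem.Dict.getD pvClosure s [] = [] := by
    apply pvGetD_not_key
    intro p hp
    have : pvClosure.items.map Prod.fst =
      ["brief", "stakeholder", "requirement", "nfr", "risk_score", "process_flow",
       "fsd_section", "test_script", "assumption", "constraint", "change_impact", "user_story"] := by decide
    have hk : p.1 ∈ pvClosure.items.map Prod.fst := List.mem_map_of_mem hp
    rw [this] at hk
    simp only [List.mem_cons, List.not_mem_nil, or_false] at hk
    rcases hk with h | h | h | h | h | h | h | h | h | h | h | h <;>
      rw [h] <;> (first | exact Ne.symm n1 | exact Ne.symm n2 | exact Ne.symm n3 | exact Ne.symm n4 | exact Ne.symm n5 | exact Ne.symm n6 | exact Ne.symm n7 | exact Ne.symm n8 | exact Ne.symm n9 | exact Ne.symm n10 | exact Ne.symm n11 | exact Ne.symm n12)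
  unfold get_downstream get_downstream_alt
  rw [hd, hc]
  rfl

-- ===== VERDICT (by name: the statement is the Claim_ definition above) =====
theorem get_downstream_spec : Claim_equal_get_downstream := by
  intro s _
  unfold Spec_get_downstream
  by_cases h : s ∈ (["brief", "stakeholder", "requirement", "nfr", "risk_score", "process_flow",
      "fsd_section", "test_script", "assumption", "constraint", "change_impact", "user_story"] : List String)
  · simp only [List.mem_cons, List.not_mem_nil, or_false] at h
    rcases h with h | h | h | h | h | h | h | h | h | h | h | h <;> subst h <;> decide
  · exact pvNotKey_eq s h
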